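-- pv_equiv track=rewrite | github.com/NEELSAMEL23/DSA | 12.Queue/6.py | implement_queue
-- ===== SOURCE A (Python) =====
-- class QueueUsingStacks:
--     def __init__(self):
--         self.S1 = []
--         self.S2 = []
--
--     def push(self, x):
--         while self.S1:
--             self.S2.append(self.S1.pop())
--         self.S1.append(x)
--         while self.S2:
--             self.S1.append(self.S2.pop())
--
--     def pop(self):
--         if self.S1:
--             return self.S1.pop()
--         return None
--
--     def front(self):
--         if self.S1:
--             return self.S1[-1]
--         return None
--
-- def implement_queue(queries):
--     q = QueueUsingStacks()
--     result = []
--     for query in queries: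
--         if query[0] == 0:
--             q.push(query[1])
--         elif query[0] == 1:
--             result.append(q.front())
--         elif query[0] == 2:
--             q.pop()
--     return result
-- ===== SOURCE B (Python) =====
-- def implement_queue(queries):
--     inbox, outbox = [], []
--     result = []
--     for query in queries:
--         op = query[0]
--         if op == 0:
--             inbox.append(query[1])
--         elif op == 1:
--             if not outbox:
--                 outbox = inbox[::-1]
--                 inbox = []
--             result.append(outbox[-1] if outbox else None)
--         elif op == 2:
--             if not outbox:
--                 outbox = inbox[::-1]
--                 inbox = []
--             if outbox:
--                 outbox.pop()
--     return result
-- ===== Notes on version B (the rewrite author's own statement) =====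
-- stated objective: alternative
-- what changed: Replaced the eager two-stack queue (every push drains S1 into S2 and back) by a lazy inbox/outbox queue: push is a single append and the reversal happens only when the outbox runs dry; the transfer loop moves from the write side to the read side.
import Mathlib
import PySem

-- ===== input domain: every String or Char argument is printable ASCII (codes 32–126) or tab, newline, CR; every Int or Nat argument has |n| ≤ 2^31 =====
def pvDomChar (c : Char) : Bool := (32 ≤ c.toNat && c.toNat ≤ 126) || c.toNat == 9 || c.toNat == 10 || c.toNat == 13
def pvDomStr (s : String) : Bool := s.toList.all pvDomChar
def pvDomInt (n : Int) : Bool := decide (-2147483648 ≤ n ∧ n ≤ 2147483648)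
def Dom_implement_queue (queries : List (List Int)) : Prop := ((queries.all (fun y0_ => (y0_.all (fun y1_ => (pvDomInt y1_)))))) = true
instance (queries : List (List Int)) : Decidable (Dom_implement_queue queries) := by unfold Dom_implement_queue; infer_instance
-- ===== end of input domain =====

-- B replaces A's eager two-stack queue (which drains the stack back and forth on
-- every push) by a lazy inbox/outbox queue: push just appends, and the reversal
-- happens only when the outbox runs dry (objective: alternative algorithm).

-- ===== PORT A =====
-- Stacks are encoded as Lean lists with the stack TOP at the HEAD
-- (Python list.append/pop act at the end; s[-1] is the top).
-- 'while src: dst.append(src.pop())' :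
def pvTransfer : List Int → List Int → List Int
  | [], dst => dst
  | a :: src, dst => pvTransfer src (a :: dst)

-- QueueUsingStacks.push: drain S1 into S2, put x, drain S2 back.
def pvPushA (x : Int) (s1 : List Int) : List Int :=
  pvTransfer (pvTransfer s1 []) [x]

def pvGoA : List (List Int) → List Int → List (Option Int) → List (Option Int)
  | [], _, acc => acc.reverse
  | query :: rest, s1, acc =>
    match query with
    | c :: args =>
      if c = 0 then
        match args with
        | x :: _ => pvGoA rest (pvPushA x s1) acc
        | [] => pvGoA rest s1 acc          -- Python raises here: outside Pre_
      else if c = 1 then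
        -- front(): S1[-1] (= head of our encoding) or None
        pvGoA rest s1 (s1.head? :: acc)
      else if c = 2 then
        -- pop(): remove top if any
        pvGoA rest s1.tail acc
      else pvGoA rest s1 acc
    | [] => pvGoA rest s1 acc              -- Python raises here: outside Pre_

def implement_queue (queries : List (List Int)) : List (Option Int) :=
  pvGoA queries [] []

-- ===== PORT B =====
-- inbox has its newest element at the head; outbox has the queue front at the head.
-- 'if not outbox: outbox = inbox[::-1]; inbox = []'
def pvNorm (inb out : List Int) : List Int × List Int :=
  if out.isEmpty then ([], inb.reverse) else (inb, out)

def pvGoB : List (List Int) → List Int → List Int → List (Option Int) → List (Option Int)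
  | [], _, _, acc => acc.reverse
  | query :: rest, inb, out, acc =>
    match query with
    | c :: args =>
      if c = 0 then
        match args with
        | x :: _ => pvGoB rest (x :: inb) out acc
        | [] => pvGoB rest inb out acc     -- Python raises here: outside Pre_
      else if c = 1 then
        let p := pvNorm inb out
        pvGoB rest p.1 p.2 (p.2.head? :: acc)
      else if c = 2 then
        let p := pvNorm inb out
        pvGoB rest p.1 p.2.tail acc
      else pvGoB rest inb out acc
    | [] => pvGoB rest inb out acc         -- Python raises here: outside Pre_

def implement_queue_alt (queries : List (List Int)) : List (Option Int) :=
  pvGoB queries [] [] []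

-- ===== PRECONDITION & SPEC =====
-- Pre_ excludes malformed queries on which Python A raises IndexError:
-- an empty query (query[0]) and a push query without an argument (query[1]).
def Pre_implement_queue (queries : List (List Int)) : Prop :=
  ∀ q ∈ queries, q ≠ [] ∧ (q.head? = some 0 → q.tail ≠ [])
instance (queries : List (List Int)) : Decidable (Pre_implement_queue queries) := by
  unfold Pre_implement_queue; infer_instance

def pvWitness_implement_queue : List (List Int) := [[0, 5], [1], [0, 7], [2], [1], [2], [1]]

def Spec_implement_queue (queries : List (List Int)) (out : List (Option Int)) : Prop := out = implement_queue_alt queries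
instance (queries : List (List Int)) (out : List (Option Int)) : Decidable (Spec_implement_queue queries out) := by unfold Spec_implement_queue; infer_instance

-- ===== CLAIM (what is proved, stated in full; the proofs are below) =====
def Claim_equal_implement_queue : Prop := ∀ (queries : List (List Int)), Dom_implement_queue queries → Pre_implement_queue queries → Spec_implement_queue queries (implement_queue queries)

-- ===== LEMMAS AND PROOFS =====

theorem pvTransfer_eq (s d : List Int) : pvTransfer s d = s.reverse ++ d := by
  induction s generalizing d with
  | nil => simp [pvTransfer]
  | cons a s ih => simp [pvTransfer, ih]

theorem pvPushA_eq (x : Int) (s1 : List Int) : pvPushA x s1 = s1 ++ [x] := by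
  simp [pvPushA, pvTransfer_eq]

-- The simulation invariant: A's single stack (front at head) is exactly
-- B's queue outbox ++ inbox.reverse.
theorem pvGo_eq (qs : List (List Int)) (inb out : List Int) (acc : List (Option Int)) :
    pvGoA qs (out ++ inb.reverse) acc = pvGoB qs inb out acc := by
  induction qs generalizing inb out acc with
  | nil => simp [pvGoA, pvGoB]
  | cons q rest ih =>
    match q with
    | [] => simpa [pvGoA, pvGoB] using ih inb out acc
    | c :: args =>
      by_cases h0 : c = 0
      · match args with
        | [] => simpa [pvGoA, pvGoB, h0] using ih inb out acc
        | x :: _ =>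
          have := ih (x :: inb) out acc
          simpa [pvGoA, pvGoB, h0, pvPushA_eq] using this
      · by_cases h1 : c = 1
        · cases out with
          | nil =>
            have := ih [] inb.reverse ((inb.reverse).head? :: acc)
            simpa [pvGoA, pvGoB, pvNorm, h0, h1] using this
          | cons b out' =>
            have := ih inb (b :: out') ((b :: out').head? :: acc)
            simpa [pvGoA, pvGoB, pvNorm, h0, h1] using this
        · by_cases h2 : c = 2
          · cases out with
            | nil =>
              have := ih [] (inb.reverse).tail acc
              cases hrev : inb.reverse with
              | nil => simpa [pvGoA, pvGoB, pvNorm, h0, h1, h2, hrev] using ih [] [] acc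
              | cons b t =>
                have := ih [] t acc
                simpa [pvGoA, pvGoB, pvNorm, h0, h1, h2, hrev] using this
            | cons b out' =>
              have := ih inb out' acc
              simpa [pvGoA, pvGoB, pvNorm, h0, h1, h2] using this
          · simpa [pvGoA, pvGoB, h0, h1, h2] using ih inb out acc

-- ===== VERDICT (by name: the statement is the Claim_ definition above) =====
theorem implement_queue_spec : Claim_equal_implement_queue := by
  intro queries _ _
  unfold Spec_implement_queue implement_queue implement_queue_alt
  simpa using pvGo_eq queries [] [] []
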